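-- pv_equiv track=rewrite | github.com/golibabduxalilov1/jalyuzBot | services/validation.py | validate_text_input
-- ===== SOURCE A (Python) =====
-- from typing import Optional, Tuple
--
-- def validate_text_input(text: str, max_length: int = 1000, field_name: str = "Matn") -> Tuple[bool, Optional[str]]:
--     """
--     Validate text input (messages, descriptions, etc).
--
--     Args:
--         text: User input text
--         max_length: Maximum allowed length
--         field_name: Field name for error messages
--
--     Returns:
--         Tuple[bool, Optional[str]]: (is_valid, error_message)
--
--     Rules:
--         - Length: 1-max_length characters
--         - Not allowed: excessive whitespace, control characters
--
--     Examples: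
--         >>> validate_text_input("Normal text")
--         (True, None)
--         >>> validate_text_input("")
--         (False, "Matn bo'sh bo'lishi mumkin emas")
--         >>> validate_text_input("A" * 2000)
--         (False, "Matn juda uzun (maksimum 1000 belgi)")
--     """
--     if not text:
--         return False, f"{field_name} bo'sh bo'lishi mumkin emas"
--
--     if not isinstance(text, str):
--         return False, f"{field_name} matn formatida bo'lishi kerak"
--
--     # Strip whitespace
--     text = text.strip()
--
--     if not text:
--         return False, f"{field_name} bo'sh bo'lishi mumkin emas"
--
--     # Check length
--     if len(text) > max_length:
--         return False, f"{field_name} juda uzun (maksimum {max_length} belgi)"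
--
--     # Check for control characters (except newline, tab, carriage return)
--     control_chars = [chr(i) for i in range(32) if i not in [9, 10, 13]]
--     for char in control_chars:
--         if char in text:
--             return False, f"{field_name} noto'g'ri belgilarni o'z ichiga oladi"
--
--     return True, None
-- ===== SOURCE B (Python) =====
-- from typing import Optional, Tuple
--
--
-- def _text_error(text: str, max_length: int, field_name: str) -> Optional[str]:
--     """Return the first validation error message, or None if the text is valid."""
--     stripped = text.strip()
--     if not text or not stripped:
--         return f"{field_name} bo'sh bo'lishi mumkin emas"
--     if len(stripped) > max_length:
--         return f"{field_name} juda uzun (maksimum {max_length} belgi)"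
--     if any(ord(c) < 32 and c not in "\t\n\r" for c in stripped):
--         return f"{field_name} noto'g'ri belgilarni o'z ichiga oladi"
--     return None
--
--
-- def validate_text_input(text: str, max_length: int = 1000, field_name: str = "Matn") -> Tuple[bool, Optional[str]]:
--     """Decomposed as an Optional-error pipeline: a helper computes the error
--     message (with a single linear scan for control characters instead of 29
--     substring searches), and the (ok, message) pair is derived from it."""
--     err = _text_error(text, max_length, field_name)
--     return err is None, err
-- ===== Notes on version B (the rewrite author's own statement) =====
-- stated objective: alternative
-- what changed: B is restructured as an Optional-error pipeline (a helper returns the first error message or None and the (ok,msg) pair is derived from it) and the control-character check is one linear scan over the text's characters instead of 29 per-control-character substring searches.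
import Mathlib
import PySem

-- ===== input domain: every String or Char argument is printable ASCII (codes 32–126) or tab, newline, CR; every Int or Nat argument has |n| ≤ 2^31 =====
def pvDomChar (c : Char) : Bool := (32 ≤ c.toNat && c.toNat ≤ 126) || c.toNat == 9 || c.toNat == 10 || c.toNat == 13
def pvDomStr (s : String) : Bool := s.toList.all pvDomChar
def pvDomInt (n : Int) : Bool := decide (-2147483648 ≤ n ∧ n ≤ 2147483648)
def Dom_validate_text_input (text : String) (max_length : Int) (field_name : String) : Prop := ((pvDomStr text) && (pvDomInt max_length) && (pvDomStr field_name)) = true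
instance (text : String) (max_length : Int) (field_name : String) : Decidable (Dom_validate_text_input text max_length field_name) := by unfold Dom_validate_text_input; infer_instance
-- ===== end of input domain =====

-- B restructures A's early-return chain as an Optional-error helper and replaces the 29 substring searches by one scan; equal on all inputs.

-- ===== PORT A =====
-- control_chars = [chr(i) for i in range(32) if i not in [9, 10, 13]]
def pvControlChars : List Char :=
  ((PySem.List.pyRange 0 32 1).filter (fun i => decide (i ∉ [(9 : Int), 10, 13]))).map
    (fun i => Char.ofNat i.toNat)

def validate_text_input (text : String) (max_length : Int) (field_name : String) : Bool × Option String :=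
  if text = "" then (false, some (field_name ++ " bo'sh bo'lishi mumkin emas"))
  else
    -- isinstance(text, str) is always true under the type convention
    let stext := PySem.Str.strip text
    if stext = "" then (false, some (field_name ++ " bo'sh bo'lishi mumkin emas"))
    else if max_length < PySem.Str.len stext then
      (false, some (field_name ++ " juda uzun (maksimum " ++ PySem.Int.toStr max_length ++ " belgi)"))
    -- for char in control_chars: if char in text: return the error (same value for every char)
    else if pvControlChars.any (fun ch => PySem.Str.isIn (String.ofList [ch]) stext) then
      (false, some (field_name ++ " noto'g'ri belgilarni o'z ichiga oladi"))
    else (true, none)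

-- ===== PORT B =====
-- helper _text_error: the first error message, or none if valid
def pvTextError (text : String) (max_length : Int) (field_name : String) : Option String :=
  let stripped := PySem.Str.strip text
  if text = "" ∨ stripped = "" then some (field_name ++ " bo'sh bo'lishi mumkin emas")
  else if max_length < PySem.Str.len stripped then
    some (field_name ++ " juda uzun (maksimum " ++ PySem.Int.toStr max_length ++ " belgi)")
  else if stripped.toList.any (fun c => decide (c.toNat < 32) && !decide (c ∈ ['\t', '\n', '\r'])) then
    some (field_name ++ " noto'g'ri belgilarni o'z ichiga oladi")
  else none

def validate_text_input_alt (text : String) (max_length : Int) (field_name : String) : Bool × Option String :=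
  let err := pvTextError text max_length field_name
  (err.isNone, err)

-- ===== PRECONDITION & SPEC =====
def Spec_validate_text_input (text : String) (max_length : Int) (field_name : String) (out : Bool × Option String) : Prop := out = validate_text_input_alt text max_length field_name
instance (text : String) (max_length : Int) (field_name : String) (out : Bool × Option String) : Decidable (Spec_validate_text_input text max_length field_name out) := by unfold Spec_validate_text_input; infer_instance

-- ===== CLAIM (what is proved, stated in full; the proofs are below) =====
def Claim_equal_validate_text_input : Prop := ∀ (text : String) (max_length : Int) (field_name : String), Dom_validate_text_input text max_length field_name → Spec_validate_text_input text max_length field_name (validate_text_input text max_length field_name)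

-- ===== LEMMAS AND PROOFS =====

lemma pvControlChars_eq : pvControlChars =
    ['\x00','\x01','\x02','\x03','\x04','\x05','\x06','\x07','\x08','\x0b','\x0c',
     '\x0e','\x0f','\x10','\x11','\x12','\x13','\x14','\x15','\x16','\x17','\x18',
     '\x19','\x1a','\x1b','\x1c','\x1d','\x1e','\x1f'] := by decide

lemma mem_pvControlChars (c : Char) :
    c ∈ pvControlChars ↔ c.toNat < 32 ∧ c ≠ '\t' ∧ c ≠ '\n' ∧ c ≠ '\r' := by
  rw [pvControlChars_eq]
  constructor
  · intro h
    fin_cases h <;> decide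
  · rintro ⟨h32, h9, h10, h13⟩
    have h9' : c.toNat ≠ 9 := fun h => h9 (by rw [← Char.ofNat_toNat c, h])
    have h10' : c.toNat ≠ 10 := fun h => h10 (by rw [← Char.ofNat_toNat c, h])
    have h13' : c.toNat ≠ 13 := fun h => h13 (by rw [← Char.ofNat_toNat c, h])
    have key : ∀ n : Fin 32, n.val ≠ 9 → n.val ≠ 10 → n.val ≠ 13 → Char.ofNat n.val ∈
        ['\x00','\x01','\x02','\x03','\x04','\x05','\x06','\x07','\x08','\x0b','\x0c',
         '\x0e','\x0f','\x10','\x11','\x12','\x13','\x14','\x15','\x16','\x17','\x18',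
         '\x19','\x1a','\x1b','\x1c','\x1d','\x1e','\x1f'] := by decide
    have := key ⟨c.toNat, h32⟩ h9' h10' h13'
    rwa [Char.ofNat_toNat] at this

lemma scan_eq_chars (l : List Char) :
    (∃ x ∈ pvControlChars, PySem.Chars.isIn [x] l = true)
      ↔ (∃ x ∈ l, x.toNat < 32 ∧ ¬x = '\t' ∧ ¬x = '\n' ∧ ¬x = '\r') := by
  simp only [PySem.Chars.isIn_iff_infix, List.singleton_infix_iff, mem_pvControlChars]
  constructor
  · rintro ⟨ch, ⟨h32, h9, h10, h13⟩, hmem⟩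
    exact ⟨ch, hmem, h32, h9, h10, h13⟩
  · rintro ⟨c, hmem, h32, h9, h10, h13⟩
    exact ⟨c, ⟨h32, h9, h10, h13⟩, hmem⟩

-- ===== VERDICT (by name: the statement is the Claim_ definition above) =====
theorem validate_text_input_spec : Claim_equal_validate_text_input := by
  intro text max_length field_name _
  unfold Spec_validate_text_input validate_text_input validate_text_input_alt pvTextError
  by_cases ht : text = ""
  · simp [ht, PySem.Str.strip]
  · simp only [eq_false ht, if_false, false_or]
    by_cases hs : PySem.Str.strip text = "" <;>
      simp [hs] <;> split_ifs with h1 h2 h3 <;>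
        simp_all [scan_eq_chars (PySem.Chars.strip text.toList)]
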